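-- pv_equiv track=rewrite | github.com/ssxtc/NeuroMesh-test | test01.py | subsequences_num
-- ===== SOURCE A (Python) =====
-- def subsequences_num(source, target):
--     # initialization
--     source_len, target_len = len(source), len(target)
--     i, j = 0, 0
--     count = 0
--
--     while j < target_len:
--         start = j
--
--         # traverse the source
--         while i < source_len and j < target_len:
--             if source[i] == target[j]:
--                 j += 1
--             i += 1
--
--         # can not construct the target
--         if start == j:
--             return -1
--
--         # record the number of subsequences
--         count += 1
--         i = 0
--
--     return count
-- ===== SOURCE B (Python) =====
-- def subsequences_num(source, target):
--     # Index the source once: char -> sorted list of its positions.  Then walk the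
--     # target, binary-searching the next occurrence at-or-after the cursor and
--     # starting a new pass (count += 1) whenever there is none.
--     pos = {}
--     for idx, ch in enumerate(source):
--         pos.setdefault(ch, []).append(idx)
--     if not target:
--         return 0
--     count, i = 1, 0
--     for c in target:
--         lst = pos.get(c)
--         if lst is None:
--             return -1
--         # first index lo with lst[lo] >= i (hand-rolled bisect_left)
--         lo, hi = 0, len(lst)
--         while lo < hi:
--             mid = (lo + hi) // 2
--             if lst[mid] < i:
--                 lo = mid + 1
--             else:
--                 hi = mid
--         if lo == len(lst):
--             count += 1
--             i = lst[0] + 1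
--         else:
--             i = lst[lo] + 1
--     return count
-- ===== Notes on version B (the rewrite author's own statement) =====
-- stated objective: alternative
-- what changed: A repeatedly rescans the source character-by-character with nested while loops; B first builds a dictionary mapping each character to the sorted list of its positions in the source, then walks the target once, binary-searching that list for the next occurrence at or after the cursor and counting a wrap when none exists.
import Mathlib
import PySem

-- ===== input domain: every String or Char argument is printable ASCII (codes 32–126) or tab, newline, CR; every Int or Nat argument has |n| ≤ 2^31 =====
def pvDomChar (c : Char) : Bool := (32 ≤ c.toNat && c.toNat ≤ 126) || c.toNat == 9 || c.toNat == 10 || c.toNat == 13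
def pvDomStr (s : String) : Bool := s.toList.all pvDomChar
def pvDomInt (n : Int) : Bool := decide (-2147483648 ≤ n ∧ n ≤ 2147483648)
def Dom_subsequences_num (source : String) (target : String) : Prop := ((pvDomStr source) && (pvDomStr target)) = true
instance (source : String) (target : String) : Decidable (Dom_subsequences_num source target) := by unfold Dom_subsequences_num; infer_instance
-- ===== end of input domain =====

-- B indexes the source once (char -> sorted position list) and binary-searches the next
-- occurrence while walking the target, instead of A's nested rescans; same value, proved below.

-- ===== PORT A =====
-- inner `while i < source_len and j < target_len` loop: returns the final (i, j).
-- `fuel` is only a definitional totality guard (the wrapper supplies src.length - i,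
-- which bounds the remaining iterations); the computation is the Python loop's.
def pvInnerAF (src tgt : List Char) : Nat → Nat → Nat → Nat × Nat
  | 0, i, j => (i, j)
  | fuel + 1, i, j =>
    if h : i < src.length ∧ j < tgt.length then
      if src[i]'h.1 = tgt[j]'h.2 then pvInnerAF src tgt fuel (i + 1) (j + 1)
      else pvInnerAF src tgt fuel (i + 1) j
    else (i, j)

def pvInnerA (src tgt : List Char) (i j : Nat) : Nat × Nat :=
  pvInnerAF src tgt (src.length - i) i j

-- outer `while j < target_len` loop (Python re-enters each pass with i reset to 0);
-- `fuel` again only guards totality (the wrapper supplies tgt.length - j, which bounds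
-- the number of remaining passes since each pass advances j)
def pvOuterAF (src tgt : List Char) : Nat → Nat → Int → Int
  | 0, _, count => count
  | fuel + 1, j, count =>
    if j < tgt.length then
      if j = (pvInnerA src tgt 0 j).2 then -1
      else pvOuterAF src tgt fuel (pvInnerA src tgt 0 j).2 (count + 1)
    else count

def pvOuterA (src tgt : List Char) (j : Nat) (count : Int) : Int :=
  pvOuterAF src tgt (tgt.length - j) j count

def subsequences_num (source : String) (target : String) : Int :=
  pvOuterA source.toList target.toList 0 0

-- ===== PORT B =====
-- the `for idx, ch in enumerate(source): pos.setdefault(ch, []).append(idx)` loop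
-- (setdefault-then-append ≡ Dict.modify with default [])
def pvBuildB (source : List Char) : PySem.Dict Char (List Int) :=
  (PySem.List.enumerate source 0).foldl
    (fun d p => d.modify p.2 [] (fun l => l ++ [p.1])) PySem.Dict.empty

-- the hand-rolled bisect_left `while lo < hi` loop; lo, hi are the Python ints, which
-- stay nonnegative, so Nat with Nat division is exact for `(lo + hi) // 2`.
-- `fuel` is only a definitional totality guard (the wrapper supplies hi - lo, which
-- bounds the remaining iterations); the computation is the Python loop's.
def pvBSF (lst : List Int) (i : Int) : Nat -> Nat -> Nat -> Nat
  | 0, lo, _ => lo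
  | fuel + 1, lo, hi =>
    if lo < hi then
      if PySem.List.pyGetD lst (((lo + hi) / 2 : Nat) : Int) 0 < i then
        pvBSF lst i fuel ((lo + hi) / 2 + 1) hi
      else pvBSF lst i fuel lo ((lo + hi) / 2)
    else lo

def pvBS (lst : List Int) (i : Int) (lo hi : Nat) : Nat :=
  pvBSF lst i (hi - lo) lo hi

-- the `for c in target` loop with state (i, count)
def pvLoopB (pos : PySem.Dict Char (List Int)) : List Char → Int → Int → Int
  | [], _, count => count
  | c :: rest, i, count =>
    match pos.get? c with
    | none => -1
    | some lst =>
      let lo := pvBS lst i 0 lst.length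
      if lo = lst.length then
        pvLoopB pos rest (PySem.List.pyGetD lst 0 0 + 1) (count + 1)
      else
        pvLoopB pos rest (PySem.List.pyGetD lst (lo : Int) 0 + 1) count

def subsequences_num_alt (source : String) (target : String) : Int :=
  if target.toList = [] then 0
  else pvLoopB (pvBuildB source.toList) target.toList 0 1

-- ===== PRECONDITION & SPEC =====
def Spec_subsequences_num (source : String) (target : String) (out : Int) : Prop := out = subsequences_num_alt source target
instance (source : String) (target : String) (out : Int) : Decidable (Spec_subsequences_num source target out) := by unfold Spec_subsequences_num; infer_instance

-- ===== CLAIM (what is proved, stated in full; the proofs are below) =====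
def Claim_equal_subsequences_num : Prop := ∀ (source : String) (target : String), Dom_subsequences_num source target → Spec_subsequences_num source target (subsequences_num source target)

-- ===== LEMMAS AND PROOFS =====

-- fuel does not matter once it bounds the remaining iterations
theorem pvInnerA_unfold (src tgt : List Char) (i j : Nat) :
    pvInnerA src tgt i j =
      if h : i < src.length ∧ j < tgt.length then
        (if src[i]'h.1 = tgt[j]'h.2 then pvInnerA src tgt (i + 1) (j + 1)
         else pvInnerA src tgt (i + 1) j)
      else (i, j) := by
  unfold pvInnerA
  by_cases hi : i < src.length
  · obtain ⟨m, hm⟩ : ∃ m, src.length - i = m + 1 := ⟨src.length - i - 1, by omega⟩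
    rw [hm]
    have hm' : m = src.length - (i + 1) := by omega
    rw [pvInnerAF, hm']
  · have h0 : src.length - i = 0 := by omega
    rw [h0, pvInnerAF, dif_neg (by omega)]

theorem pvInnerAF_le (src tgt : List Char) (fuel : Nat) :
    ∀ i j, j ≤ (pvInnerAF src tgt fuel i j).2 := by
  induction fuel with
  | zero => intro i j; exact le_rfl
  | succ fuel ih =>
    intro i j
    rw [pvInnerAF]
    split_ifs with h1 h2
    · exact le_trans (Nat.le_succ j) (ih (i + 1) (j + 1))
    · exact ih (i + 1) j
    · exact le_rfl

theorem pvInnerA_le (src tgt : List Char) (i j : Nat) : j ≤ (pvInnerA src tgt i j).2 :=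
  pvInnerAF_le src tgt (src.length - i) i j

theorem pvInnerAF_le_len (src tgt : List Char) (fuel : Nat) :
    ∀ i j, j ≤ tgt.length → (pvInnerAF src tgt fuel i j).2 ≤ tgt.length := by
  induction fuel with
  | zero => intro i j hj; exact hj
  | succ fuel ih =>
    intro i j hj
    rw [pvInnerAF]
    split_ifs with h1 h2
    · exact ih (i + 1) (j + 1) h1.2
    · exact ih (i + 1) j hj
    · exact hj

theorem pvInnerA_le_len (src tgt : List Char) (i j : Nat) (hj : j ≤ tgt.length) :
    (pvInnerA src tgt i j).2 ≤ tgt.length :=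
  pvInnerAF_le_len src tgt (src.length - i) i j hj

theorem pvOuterAF_fuel (src tgt : List Char) (f1 : Nat) :
    ∀ f2 j (count : Int), tgt.length - j ≤ f1 → tgt.length - j ≤ f2 →
      pvOuterAF src tgt f1 j count = pvOuterAF src tgt f2 j count := by
  induction f1 with
  | zero =>
    intro f2 j count h1 h2
    cases f2 with
    | zero => rfl
    | succ f2 => rw [pvOuterAF, pvOuterAF, if_neg (by omega)]
  | succ f1 ih =>
    intro f2 j count h1 h2
    cases f2 with
    | zero => rw [pvOuterAF, pvOuterAF, if_neg (by omega)]
    | succ f2 =>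
      rw [pvOuterAF, pvOuterAF]
      by_cases hj : j < tgt.length
      · rw [if_pos hj, if_pos hj]
        by_cases hne : j = (pvInnerA src tgt 0 j).2
        · rw [if_pos hne, if_pos hne]
        · rw [if_neg hne, if_neg hne]
          have hle := pvInnerA_le src tgt 0 j
          exact ih f2 (pvInnerA src tgt 0 j).2 (count + 1) (by omega) (by omega)
      · rw [if_neg hj, if_neg hj]

theorem pvOuterA_unfold (src tgt : List Char) (j : Nat) (count : Int) :
    pvOuterA src tgt j count =
      if j < tgt.length then
        (if j = (pvInnerA src tgt 0 j).2 then -1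
         else pvOuterA src tgt (pvInnerA src tgt 0 j).2 (count + 1))
      else count := by
  unfold pvOuterA
  by_cases hj : j < tgt.length
  · obtain ⟨m, hm⟩ : ∃ m, tgt.length - j = m + 1 := ⟨tgt.length - j - 1, by omega⟩
    rw [hm, pvOuterAF, if_pos hj, if_pos hj]
    by_cases hne : j = (pvInnerA src tgt 0 j).2
    · rw [if_pos hne, if_pos hne]
    · rw [if_neg hne, if_neg hne]
      have hle := pvInnerA_le src tgt 0 j
      exact pvOuterAF_fuel src tgt m (tgt.length - (pvInnerA src tgt 0 j).2)
        (pvInnerA src tgt 0 j).2 (count + 1) (by omega) (by omega)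
  · have h0 : tgt.length - j = 0 := by omega
    rw [h0, pvOuterAF, if_neg hj]

-- reference: first index k ≥ i with src[k] = c, as an Int (-1 = none)
def pvFindC (src : List Char) (c : Char) (i : Nat) : Int :=
  if h : i < src.length then
    if src[i]'h = c then (i : Int) else pvFindC src c (i + 1)
  else -1
termination_by src.length - i
decreasing_by
  exact Nat.sub_succ_lt_self _ _ h

theorem pvFindC_eq_neg_one (src : List Char) (c : Char) (i : Nat) :
    pvFindC src c i = -1 ↔ ∀ k, i ≤ k → (h : k < src.length) → src[k] ≠ c := by
  fun_induction pvFindC src c i with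
  | case1 i h heq =>
    exact iff_of_false (by omega) (fun hall => hall i le_rfl h heq)
  | case2 i h heq ih =>
    rw [ih]
    constructor
    · intro hall k hk hklen
      rcases Nat.eq_or_lt_of_le hk with rfl | h'
      · exact heq
      · exact hall k h' hklen
    · intro hall k hk hklen
      exact hall k (by omega) hklen
  | case3 i h =>
    exact iff_of_true rfl (fun k hk hklen => absurd hklen (by omega))

theorem pvFindC_cases (src : List Char) (c : Char) (i : Nat) :
    pvFindC src c i = -1 ∨
      ∃ (k : Nat) (hk : k < src.length), pvFindC src c i = (k : Int) ∧ i ≤ k ∧ src[k] = c ∧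
        ∀ m, i ≤ m → m < k → (hm : m < src.length) → src[m] ≠ c := by
  fun_induction pvFindC src c i with
  | case1 i h heq =>
    exact Or.inr ⟨i, h, rfl, le_rfl, heq, fun m h1 h2 hm => absurd h2 (by omega)⟩
  | case2 i h heq ih =>
    rcases ih with hneg | ⟨k, hk, he, hik, hc, hmin⟩
    · exact Or.inl hneg
    · refine Or.inr ⟨k, hk, he, by omega, hc, fun m h1 h2 hm => ?_⟩
      rcases Nat.eq_or_lt_of_le h1 with rfl | h'
      · exact heq
      · exact hmin m h' h2 hm
  | case3 i h =>
    exact Or.inl rfl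

-- reference loop: the target-driven walk phrased directly through pvFindC
def pvRefLoop (src : List Char) : List Char → Nat → Int → Int
  | [], _, count => count
  | c :: rest, i, count =>
    if pvFindC src c i = -1 then
      if pvFindC src c 0 = -1 then -1
      else pvRefLoop src rest ((pvFindC src c 0).toNat + 1) (count + 1)
    else pvRefLoop src rest ((pvFindC src c i).toNat + 1) count


theorem pvRefLoop_cons (src : List Char) (c : Char) (rest : List Char) (i : Nat) (count : Int) :
    pvRefLoop src (c :: rest) i count =
      if pvFindC src c i = -1 then
        (if pvFindC src c 0 = -1 then -1
         else pvRefLoop src rest ((pvFindC src c 0).toNat + 1) (count + 1))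
      else pvRefLoop src rest ((pvFindC src c i).toNat + 1) count := rfl

-- ---------- A = pvRefLoop ----------

-- inner loop, stuck case: the needed char has no occurrence at or after i
theorem pvInnerA_stuck (src tgt : List Char) (n : Nat) :
    ∀ i j, src.length - i = n → i ≤ src.length → (hj : j < tgt.length) →
      pvFindC src (tgt[j]'hj) i = -1 → pvInnerA src tgt i j = (src.length, j) := by
  induction n with
  | zero =>
    intro i j hn hi hj hf
    have hi' : i = src.length := by omega
    rw [pvInnerA_unfold, dif_neg (by omega)]
    rw [hi']
  | succ n ih =>
    intro i j hn hi hj hf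
    have hilt : i < src.length := by omega
    have hne : ¬ (src[i]'hilt = tgt[j]'hj) :=
      fun h => (pvFindC_eq_neg_one src (tgt[j]'hj) i).mp hf i le_rfl hilt h
    have hf' : pvFindC src (tgt[j]'hj) (i + 1) = -1 := by
      rw [pvFindC_eq_neg_one] at hf ⊢
      intro k hk hklen
      exact hf k (by omega) hklen
    rw [pvInnerA_unfold, dif_pos ⟨hilt, hj⟩, if_neg hne]
    exact ih (i + 1) j (by omega) (by omega) hj hf'

-- inner loop, found case: it jumps to just past the first occurrence
theorem pvInnerA_step (src tgt : List Char) (n : Nat) :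
    ∀ i j, src.length - i = n → (hj : j < tgt.length) →
      pvFindC src (tgt[j]'hj) i ≠ -1 →
      pvInnerA src tgt i j =
        pvInnerA src tgt ((pvFindC src (tgt[j]'hj) i).toNat + 1) (j + 1) := by
  induction n with
  | zero =>
    intro i j hn hj hf
    exfalso
    apply hf
    rw [pvFindC.eq_def, dif_neg (by omega)]
  | succ n ih =>
    intro i j hn hj hf
    have hilt : i < src.length := by omega
    by_cases heq : src[i]'hilt = tgt[j]'hj
    · have hfe : pvFindC src (tgt[j]'hj) i = (i : Int) := by
        rw [pvFindC.eq_def, dif_pos hilt, if_pos heq]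
      rw [pvInnerA_unfold, dif_pos ⟨hilt, hj⟩, if_pos heq, hfe]
      simp
    · have hfe : pvFindC src (tgt[j]'hj) i = pvFindC src (tgt[j]'hj) (i + 1) := by
        rw [pvFindC.eq_def, dif_pos hilt, if_neg heq]
      rw [pvInnerA_unfold, dif_pos ⟨hilt, hj⟩, if_neg heq, hfe]
      rw [hfe] at hf
      exact ih (i + 1) j (by omega) hj hf

-- one pass of the reference loop, started anywhere inside a pass, via A's inner loop
theorem pvRefLoop_pass (src tgt : List Char) (n : Nat) :
    ∀ j i (count : Int), tgt.length - j = n → j ≤ tgt.length → i ≤ src.length →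
    pvRefLoop src (tgt.drop j) i count =
      if hh : (pvInnerA src tgt i j).2 < tgt.length then
        (if pvFindC src (tgt[(pvInnerA src tgt i j).2]'hh) 0 = -1 then -1
         else pvRefLoop src (tgt.drop ((pvInnerA src tgt i j).2 + 1))
                ((pvFindC src (tgt[(pvInnerA src tgt i j).2]'hh) 0).toNat + 1) (count + 1))
      else count := by
  induction n with
  | zero =>
    intro j i count hn hj hi
    have hinner : pvInnerA src tgt i j = (i, j) := by
      rw [pvInnerA_unfold, dif_neg (by omega)]
    rw [hinner]
    rw [dif_neg (by dsimp only; omega)]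
    rw [List.drop_eq_nil_of_le (by omega)]
    rfl
  | succ n ih =>
    intro j i count hn hj hi
    have hjlt : j < tgt.length := by omega
    have hdrop : tgt.drop j = tgt[j]'hjlt :: tgt.drop (j + 1) := List.drop_eq_getElem_cons hjlt
    rw [hdrop, pvRefLoop_cons]
    by_cases hf : pvFindC src (tgt[j]'hjlt) i = -1
    · -- stuck: the pass ends here; both sides show the wrap expression
      have hinner : pvInnerA src tgt i j = (src.length, j) :=
        pvInnerA_stuck src tgt (src.length - i) i j rfl hi hjlt hf
      rw [if_pos hf, hinner]
      dsimp only
      rw [dif_pos hjlt]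
    · -- found: the loop consumes one char exactly as the inner loop does
      rcases pvFindC_cases src (tgt[j]'hjlt) i with h | ⟨k, hk, he, hik, hc, hmin⟩
      · exact absurd h hf
      have hinner : pvInnerA src tgt i j =
          pvInnerA src tgt ((pvFindC src (tgt[j]'hjlt) i).toNat + 1) (j + 1) :=
        pvInnerA_step src tgt (src.length - i) i j rfl hjlt hf
      rw [if_neg hf, hinner, he]
      have htn : ((k : Int)).toNat = k := Int.toNat_natCast k
      rw [htn]
      exact ih (j + 1) (k + 1) count (by omega) (by omega) (by omega)

-- the outer loop of A equals the reference loop over the remaining target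
theorem pvOuterA_eq_refLoop (src tgt : List Char) (n : Nat) :
    ∀ j (count : Int), tgt.length - j ≤ n → j < tgt.length →
      pvOuterA src tgt j count = pvRefLoop src (tgt.drop j) 0 (count + 1) := by
  induction n with
  | zero => intro j count hn hj; exfalso; omega
  | succ n ih =>
    intro j count hn hj
    have hP := pvRefLoop_pass src tgt (tgt.length - j) j 0 (count + 1) rfl (by omega) (Nat.zero_le _)
    rw [pvOuterA_unfold, if_pos hj]
    by_cases hjr : j = (pvInnerA src tgt 0 j).2
    · rw [if_pos hjr]
      have hf0 : pvFindC src (tgt[j]'hj) 0 = -1 := by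
        by_contra hne
        have hstep := pvInnerA_step src tgt (src.length - 0) 0 j rfl hj hne
        have hle2 := pvInnerA_le src tgt ((pvFindC src (tgt[j]'hj) 0).toNat + 1) (j + 1)
        rw [← hstep] at hle2
        omega
      simp only [← hjr] at hP
      rw [hP, dif_pos hj, if_pos hf0]
    · rw [if_neg hjr]
      have hle := pvInnerA_le src tgt 0 j
      have hlt : j < (pvInnerA src tgt 0 j).2 := by omega
      have hr2le : (pvInnerA src tgt 0 j).2 ≤ tgt.length :=
        pvInnerA_le_len src tgt 0 j (by omega)
      by_cases hrl : (pvInnerA src tgt 0 j).2 < tgt.length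
      · rw [ih (pvInnerA src tgt 0 j).2 (count + 1) (by omega) hrl]
        rw [hP, dif_pos hrl]
        have hdrop : tgt.drop (pvInnerA src tgt 0 j).2 =
            (tgt[(pvInnerA src tgt 0 j).2]'hrl) :: tgt.drop ((pvInnerA src tgt 0 j).2 + 1) :=
          List.drop_eq_getElem_cons hrl
        rw [hdrop, pvRefLoop_cons]
        split_ifs with h1
        · rfl
        · rfl
      · rw [pvOuterA_unfold, if_neg (by omega)]
        rw [hP, dif_neg hrl]

-- ---------- B = pvRefLoop ----------

-- the position list of c that pvBuildB stores (sorted occurrence indices, as Ints)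
def pvOcc (src : List Char) (c : Char) : List Int :=
  (((PySem.List.enumerate src 0).map Prod.swap).filter (fun q => q.1 == c)).map (·.2)

theorem pvBuildB_getD (src : List Char) (c : Char) :
    (pvBuildB src).getD c [] = pvOcc src c := by
  unfold pvBuildB pvOcc
  have hfun : (fun (d : PySem.Dict Char (List Int)) (p : Int × Char) =>
      d.modify p.2 [] (fun l => l ++ [p.1])) =
      (fun d p => d.modify (Prod.swap p).1 [] (fun l => l ++ [(Prod.swap p).2])) := rfl
  rw [hfun,
    ← List.foldl_map (f := Prod.swap)
      (g := fun (d : PySem.Dict Char (List Int)) (q : Char × Int) => d.modify q.1 [] (fun l => l ++ [q.2])),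
    PySem.Dict.getD_foldl_modify_append, PySem.Dict.getD_empty]
  simp

theorem pvBuildB_keys (src : List Char) (c : Char) :
    c ∈ (pvBuildB src).keys ↔ c ∈ src := by
  unfold pvBuildB
  rw [PySem.Dict.keys_foldl_modify_key (key := Prod.snd)]
  rw [PySem.Dict.keys_empty, PySem.List.map_snd_enumerate]
  rw [PySem.Set.mem_update]
  simp

theorem pvBuildB_get?_none (src : List Char) (c : Char) (h : c ∉ src) :
    (pvBuildB src).get? c = none := by
  rw [PySem.Dict.get?_eq_none_iff_not_mem_keys]
  rw [pvBuildB_keys]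
  exact h

theorem pvBuildB_get?_some (src : List Char) (c : Char) (h : c ∈ src) :
    (pvBuildB src).get? c = some (pvOcc src c) := by
  cases hg : (pvBuildB src).get? c with
  | none =>
    rw [PySem.Dict.get?_eq_none_iff_not_mem_keys, pvBuildB_keys] at hg
    exact absurd h hg
  | some v =>
    have := PySem.Dict.getD_of_get?_eq_some (pvBuildB src) ([] : List Int) hg
    rw [pvBuildB_getD] at this
    rw [this]

theorem mem_pvOcc (src : List Char) (c : Char) (x : Int) :
    x ∈ pvOcc src c ↔ ∃ (k : Nat) (h : k < src.length), x = (k : Int) ∧ src[k] = c := by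
  unfold pvOcc
  simp only [List.mem_map, List.mem_filter, PySem.List.mem_enumerate_iff]
  constructor
  · rintro ⟨q, ⟨⟨p, ⟨k, hk, rfl⟩, rfl⟩, hq⟩, rfl⟩
    simp only [Prod.swap_prod_mk] at hq ⊢
    exact ⟨k, hk, by omega, by simpa using hq⟩
  · rintro ⟨k, hk, rfl, hc⟩
    exact ⟨(src[k], (k : Int)), ⟨⟨((k : Int), src[k]), ⟨k, hk, by simp⟩, rfl⟩, by simpa using hc⟩, rfl⟩

theorem pairwise_pvOcc (src : List Char) (c : Char) :
    (pvOcc src c).Pairwise (· < ·) := by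
  unfold pvOcc
  have h1 := PySem.List.pairwise_lt_enumerate (xs := src) (s := 0)
  have h2 : ((PySem.List.enumerate src 0).map Prod.swap).Pairwise (fun q q' => q.2 < q'.2) :=
    (List.pairwise_map).mpr (h1.imp (fun h => h))
  exact (List.pairwise_map).mpr (h2.sublist List.filter_sublist)

theorem pvOcc_ne_nil (src : List Char) (c : Char) (h : c ∈ src) : pvOcc src c ≠ [] := by
  obtain ⟨k, hk, he⟩ := List.mem_iff_getElem.mp h
  intro hnil
  have : (k : Int) ∈ pvOcc src c := (mem_pvOcc src c k).mpr ⟨k, hk, rfl, he⟩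
  rw [hnil] at this
  exact absurd this (List.not_mem_nil)

theorem pvBSF_fuel (lst : List Int) (i : Int) (f1 : Nat) :
    ∀ f2 lo hi, hi - lo ≤ f1 → hi - lo ≤ f2 → pvBSF lst i f1 lo hi = pvBSF lst i f2 lo hi := by
  induction f1 with
  | zero =>
    intro f2 lo hi h1 h2
    cases f2 with
    | zero => rfl
    | succ f2 => rw [pvBSF, pvBSF, if_neg (by omega)]
  | succ f1 ih =>
    intro f2 lo hi h1 h2
    cases f2 with
    | zero => rw [pvBSF, pvBSF, if_neg (by omega)]
    | succ f2 =>
      rw [pvBSF, pvBSF]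
      by_cases hlt : lo < hi
      · rw [if_pos hlt, if_pos hlt]
        by_cases hc : PySem.List.pyGetD lst (((lo + hi) / 2 : Nat) : Int) 0 < i
        · rw [if_pos hc, if_pos hc]
          exact ih f2 ((lo + hi) / 2 + 1) hi (by omega) (by omega)
        · rw [if_neg hc, if_neg hc]
          exact ih f2 lo ((lo + hi) / 2) (by omega) (by omega)
      · rw [if_neg hlt, if_neg hlt]

theorem pvBS_unfold (lst : List Int) (i : Int) (lo hi : Nat) :
    pvBS lst i lo hi =
      if lo < hi then
        (if PySem.List.pyGetD lst (((lo + hi) / 2 : Nat) : Int) 0 < i then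
          pvBS lst i ((lo + hi) / 2 + 1) hi
        else pvBS lst i lo ((lo + hi) / 2))
      else lo := by
  unfold pvBS
  by_cases hlt : lo < hi
  · obtain ⟨m, hm⟩ : ∃ m, hi - lo = m + 1 := ⟨hi - lo - 1, by omega⟩
    rw [hm, pvBSF, if_pos hlt, if_pos hlt]
    by_cases hc : PySem.List.pyGetD lst (((lo + hi) / 2 : Nat) : Int) 0 < i
    · rw [if_pos hc, if_pos hc]
      exact pvBSF_fuel lst i m _ ((lo + hi) / 2 + 1) hi (by omega) (by omega)
    · rw [if_neg hc, if_neg hc]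
      exact pvBSF_fuel lst i m _ lo ((lo + hi) / 2) (by omega) (by omega)
  · have h0 : hi - lo = 0 := by omega
    rw [h0, pvBSF, if_neg hlt]

-- binary-search invariant: pvBS returns the split point of < i vs ≥ i inside [lo, hi)
theorem pvBS_spec (lst : List Int) (hst : lst.Pairwise (· < ·)) (i : Int) (n : Nat) :
    ∀ lo hi, hi - lo ≤ n → lo ≤ hi → hi ≤ lst.length →
      lo ≤ pvBS lst i lo hi ∧ pvBS lst i lo hi ≤ hi ∧
      (∀ j (h : j < lst.length), lo ≤ j → j < pvBS lst i lo hi → lst[j] < i) ∧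
      (∀ j (h : j < lst.length), pvBS lst i lo hi ≤ j → j < hi → i ≤ lst[j]) := by
  induction n with
  | zero =>
    intro lo hi hn hlh hhl
    have heq : lo = hi := by omega
    rw [pvBS_unfold, if_neg (by omega)]
    exact ⟨le_rfl, by omega, fun j h h1 h2 => by omega, fun j h h1 h2 => by omega⟩
  | succ n ih =>
    intro lo hi hn hlh hhl
    by_cases hlt : lo < hi
    · have hmid1 : lo ≤ (lo + hi) / 2 := by omega
      have hmid2 : (lo + hi) / 2 < hi := by omega
      have hmlen : (lo + hi) / 2 < lst.length := by omega
      have hget : PySem.List.pyGetD lst (((lo + hi) / 2 : Nat) : Int) 0 = lst[(lo + hi) / 2] := by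
        rw [PySem.List.pyGetD_natCast, List.getD_eq_getElem lst 0 hmlen]
      have hpw := List.pairwise_iff_getElem.mp hst
      rw [pvBS_unfold, if_pos hlt]
      rw [hget]
      by_cases hc : lst[(lo + hi) / 2] < i
      · rw [if_pos hc]
        obtain ⟨a1, a2, a3, a4⟩ := ih ((lo + hi) / 2 + 1) hi (by omega) (by omega) hhl
        refine ⟨by omega, a2, ?_, a4⟩
        intro j h h1 h2
        rcases Nat.lt_or_ge j ((lo + hi) / 2) with hj | hj
        · exact lt_trans (hpw j ((lo + hi) / 2) h hmlen hj) hc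
        · rcases Nat.eq_or_lt_of_le hj with rfl | hj'
          · exact hc
          · exact a3 j h (by omega) h2
      · rw [if_neg hc]
        obtain ⟨a1, a2, a3, a4⟩ := ih lo ((lo + hi) / 2) (by omega) (by omega) (by omega)
        refine ⟨a1, by omega, a3, ?_⟩
        intro j h h1 h2
        rcases Nat.lt_or_ge j ((lo + hi) / 2) with hj | hj
        · exact a4 j h h1 hj
        · rcases Nat.eq_or_lt_of_le hj with rfl | hj'
          · omega
          · exact le_of_lt (lt_of_le_of_lt (by omega : i ≤ lst[(lo + hi) / 2])
              (hpw ((lo + hi) / 2) j hmlen h hj'))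
    · rw [pvBS_unfold, if_neg hlt]
      exact ⟨le_rfl, by omega, fun j h h1 h2 => by omega, fun j h h1 h2 => by omega⟩

-- the split point reads back as pvFindC
theorem pvBS_findC (src : List Char) (c : Char) (i : Nat) :
    ((pvBS (pvOcc src c) (i : Int) 0 (pvOcc src c).length = (pvOcc src c).length) →
        pvFindC src c i = -1) ∧
    (∀ h : pvBS (pvOcc src c) (i : Int) 0 (pvOcc src c).length < (pvOcc src c).length,
        pvFindC src c i = (pvOcc src c)[pvBS (pvOcc src c) (i : Int) 0 (pvOcc src c).length]) := by
  set lst := pvOcc src c with hlst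
  set lo := pvBS lst (i : Int) 0 lst.length with hlo
  obtain ⟨-, hle, hlt_i, hge_i⟩ :=
    pvBS_spec lst (pairwise_pvOcc src c) (i : Int) lst.length 0 lst.length (by omega)
      (Nat.zero_le _) le_rfl
  have hpw := List.pairwise_iff_getElem.mp (pairwise_pvOcc src c)
  constructor
  · intro hfull
    rw [pvFindC_eq_neg_one]
    intro k hk hklen hc
    have hmem : (k : Int) ∈ lst := (mem_pvOcc src c k).mpr ⟨k, hklen, rfl, hc⟩
    obtain ⟨j, hj, hje⟩ := List.mem_iff_getElem.mp hmem
    have := hlt_i j hj (Nat.zero_le _) (by omega)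
    rw [hje] at this
    omega
  · intro hlo_lt
    have hmem : lst[lo] ∈ lst := List.getElem_mem hlo_lt
    obtain ⟨m, hm, hme, hmc⟩ := (mem_pvOcc src c lst[lo]).mp hmem
    have him : (i : Int) ≤ lst[lo] := hge_i lo hlo_lt le_rfl hlo_lt
    rcases pvFindC_cases src c i with hneg | ⟨k, hk, hke, hik, hkc, hkmin⟩
    · exfalso
      exact (pvFindC_eq_neg_one src c i).mp hneg m (by omega) hm hmc
    · rw [hke]
      -- k ≤ m from minimality of pvFindC
      have hkm : k ≤ m := by
        by_contra hgt
        exact hkmin m (by omega) (by omega) hm hmc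
      -- lst[lo] ≤ k since k is an occurrence ≥ i, hence sits at an index ≥ lo
      have hkmem : (k : Int) ∈ lst := (mem_pvOcc src c k).mpr ⟨k, hk, rfl, hkc⟩
      obtain ⟨j, hj, hje⟩ := List.mem_iff_getElem.mp hkmem
      have hjge : lo ≤ j := by
        by_contra hjlt
        have := hlt_i j hj (Nat.zero_le _) (by omega)
        rw [hje] at this
        omega
      have hlstk : lst[lo] ≤ (k : Int) := by
        rcases Nat.eq_or_lt_of_le hjge with rfl | hjgt
        · rw [hje]
        · rw [← hje]; exact le_of_lt (hpw lo j hlo_lt hj hjgt)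
      omega

-- the first stored position is pvFindC from 0
theorem pvOcc_head_findC (src : List Char) (c : Char) (_h : c ∈ src) :
    ∀ hne : pvOcc src c ≠ [],
      pvFindC src c 0 = (pvOcc src c)[0]'(List.length_pos_iff.mpr hne) := by
  intro hne
  have hlen : 0 < (pvOcc src c).length := List.length_pos_iff.mpr hne
  have hpw := List.pairwise_iff_getElem.mp (pairwise_pvOcc src c)
  have hmem : (pvOcc src c)[0] ∈ pvOcc src c := List.getElem_mem hlen
  obtain ⟨m, hm, hme, hmc⟩ := (mem_pvOcc src c _).mp hmem
  rcases pvFindC_cases src c 0 with hneg | ⟨k, hk, hke, -, hkc, hkmin⟩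
  · exact absurd ((pvFindC_eq_neg_one src c 0).mp hneg m (Nat.zero_le _) hm hmc) (by simp)
  · rw [hke]
    have hkm : k ≤ m := by
      by_contra hgt
      exact hkmin m (Nat.zero_le _) (by omega) hm hmc
    have hkmem : (k : Int) ∈ pvOcc src c := (mem_pvOcc src c k).mpr ⟨k, hk, rfl, hkc⟩
    obtain ⟨j, hj, hje⟩ := List.mem_iff_getElem.mp hkmem
    have hle0 : (pvOcc src c)[0] ≤ (k : Int) := by
      rcases Nat.eq_zero_or_pos j with rfl | hjpos
      · rw [hje]
      · rw [← hje]; exact le_of_lt (hpw 0 j hlen hj hjpos)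
    omega

-- B's loop over the built index equals the reference loop
theorem pvLoopB_eq_refLoop (src : List Char) :
    ∀ (tgt : List Char) (i : Nat) (count : Int),
      pvLoopB (pvBuildB src) tgt (i : Int) count = pvRefLoop src tgt i count := by
  intro tgt
  induction tgt with
  | nil => intro i count; rfl
  | cons c rest ih =>
    intro i count
    show (match (pvBuildB src).get? c with
      | none => -1
      | some lst =>
        let lo := pvBS lst (i : Int) 0 lst.length
        if lo = lst.length then
          pvLoopB (pvBuildB src) rest (PySem.List.pyGetD lst 0 0 + 1) (count + 1)
        else
          pvLoopB (pvBuildB src) rest (PySem.List.pyGetD lst (lo : Int) 0 + 1) count) = _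
    by_cases hmem : c ∈ src
    · rw [pvBuildB_get?_some src c hmem]
      obtain ⟨hfull, hfound⟩ := pvBS_findC src c i
      set lst := pvOcc src c with hlst
      set lo := pvBS lst (i : Int) 0 lst.length with hlo
      have hne : lst ≠ [] := pvOcc_ne_nil src c hmem
      have hlen0 : 0 < lst.length := List.length_pos_iff.mpr hne
      obtain ⟨-, hle, -, -⟩ :=
        pvBS_spec lst (pairwise_pvOcc src c) (i : Int) lst.length 0 lst.length (by omega)
          (Nat.zero_le _) le_rfl
      show (if lo = lst.length then
          pvLoopB (pvBuildB src) rest (PySem.List.pyGetD lst 0 0 + 1) (count + 1)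
        else pvLoopB (pvBuildB src) rest (PySem.List.pyGetD lst (lo : Int) 0 + 1) count) = _
      by_cases hfl : lo = lst.length
      · -- wrap: pvFindC src c i = -1, restart from the head element
        rw [if_pos hfl]
        have hf : pvFindC src c i = -1 := hfull hfl
        have hhead := pvOcc_head_findC src c hmem hne
        obtain ⟨m, hm, hme, -⟩ := (mem_pvOcc src c _).mp (List.getElem_mem hlen0)
        show _ = (if pvFindC src c i = -1 then _ else _)
        rw [if_pos hf]
        have hf0 : pvFindC src c 0 ≠ -1 := by rw [hhead, hme]; omega
        rw [if_neg hf0]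
        have harg : PySem.List.pyGetD lst 0 0 + 1 = (((pvFindC src c 0).toNat + 1 : Nat) : Int) := by
          rw [PySem.List.pyGetD_zero, List.getD_eq_getElem lst 0 hlen0, hhead, hme]
          simp
        rw [harg, ih]
      · -- hit: pvFindC src c i = lst[lo]
        rw [if_neg hfl]
        have hlo_lt : lo < lst.length := by omega
        have hf := hfound hlo_lt
        obtain ⟨m, hm, hme, -⟩ := (mem_pvOcc src c _).mp (List.getElem_mem hlo_lt)
        have hfne : pvFindC src c i ≠ -1 := by rw [hf, hme]; omega
        show _ = (if pvFindC src c i = -1 then _ else _)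
        rw [if_neg hfne]
        have harg : PySem.List.pyGetD lst (lo : Int) 0 + 1 =
            (((pvFindC src c i).toNat + 1 : Nat) : Int) := by
          rw [PySem.List.pyGetD_natCast, List.getD_eq_getElem lst 0 hlo_lt, hf, hme]
          simp
        rw [harg, ih]
    · -- c not in source: both sides return -1
      rw [pvBuildB_get?_none src c hmem]
      have hf : pvFindC src c i = -1 := by
        rw [pvFindC_eq_neg_one]
        intro k hk hklen hc
        exact hmem (hc ▸ List.getElem_mem hklen)
      have hf0 : pvFindC src c 0 = -1 := by
        rw [pvFindC_eq_neg_one]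
        intro k hk hklen hc
        exact hmem (hc ▸ List.getElem_mem hklen)
      show (-1 : Int) = (if pvFindC src c i = -1 then _ else _)
      rw [if_pos hf, if_pos hf0]

-- ===== VERDICT (by name: the statement is the Claim_ definition above) =====
theorem subsequences_num_spec : Claim_equal_subsequences_num := by
  intro source target _
  unfold Spec_subsequences_num subsequences_num subsequences_num_alt
  by_cases h : target.toList = []
  · rw [if_pos h, pvOuterA_unfold, if_neg (by simp [h])]
  · have hlen : 0 < target.toList.length := List.length_pos_iff.mpr h
    rw [if_neg h,
      pvOuterA_eq_refLoop source.toList target.toList target.toList.length 0 0 (by omega) hlen,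
      List.drop_zero]
    have hB := pvLoopB_eq_refLoop source.toList target.toList 0 1
    simp only [Nat.cast_zero] at hB
    rw [hB]
    norm_num
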